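-- pv_equiv track=rewrite | github.com/qhoa256/PYTHON-CODEPTIT | .history/BIEN VA KIEU DU LIEU DON GIAN/PY01011_LIET_KE_SO_DEP_20230814152952.py | check
-- ===== SOURCE A (Python) =====
-- def check(n):
--     qhoa = str(n)
--     qhoa1 = qhoa[:]
--     qhoa2 = qhoa[: : -1]
--     cnt = 0
--     while n != 0:
--         tmp = n % 10
--         cnt += 1
--         if tmp != 0 and tmp != 2 and tmp != 4 and tmp != 6 and tmp != 8:
--             return False
--         n //= 10
--     return cnt % 2 == 1 and qhoa[: : 1] == qhoa[: : -1]
-- ===== SOURCE B (Python) =====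
-- def check(n):
--     s = str(n)
--     return n > 0 and len(s) % 2 == 1 and s == s[::-1] and all(c in '02468' for c in s)
-- ===== Notes on version B (the rewrite author's own statement) =====
-- stated objective: simpler
-- what changed: Replaces A's integer modulo digit-extraction while-loop with early returns and a manual digit counter by direct tests on str(n): positivity, odd length, slice-reversal palindrome, and every character in '02468'.
import Mathlib
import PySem

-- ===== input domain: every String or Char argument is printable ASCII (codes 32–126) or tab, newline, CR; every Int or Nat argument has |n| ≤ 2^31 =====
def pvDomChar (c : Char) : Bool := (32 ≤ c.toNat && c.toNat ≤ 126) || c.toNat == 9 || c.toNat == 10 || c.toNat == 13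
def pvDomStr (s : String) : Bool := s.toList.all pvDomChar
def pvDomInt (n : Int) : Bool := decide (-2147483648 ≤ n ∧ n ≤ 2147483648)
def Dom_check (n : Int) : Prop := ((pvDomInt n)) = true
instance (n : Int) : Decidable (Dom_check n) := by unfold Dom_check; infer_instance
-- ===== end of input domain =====

-- B replaces A's modulo digit-extraction loop (manual counter, early returns) by direct
-- string tests (positivity, odd length, slice palindrome, chars in '02468'); objective: simpler.

-- ===== PORT A =====
-- the while-loop of A: returns none on the early 'return False', otherwise the final cnt
def checkLoop (n : Int) (cnt : Int) : Option Int :=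
  if _h0 : n = 0 then some cnt
  else
    let tmp := PySem.Int.mod n 10
    if _hg : tmp ≠ 0 ∧ tmp ≠ 2 ∧ tmp ≠ 4 ∧ tmp ≠ 6 ∧ tmp ≠ 8 then none
    else checkLoop (PySem.Int.floordiv n 10) (cnt + 1)
termination_by n.natAbs
decreasing_by
  have h1 := PySem.Int.floordiv_mul_add_mod n 10
  have _h2 := PySem.Int.mod_nonneg n (b := 10) (by omega)
  have _h3 := PySem.Int.mod_lt n (b := 10) (by omega)
  simp only [not_and_or, not_not, tmp] at _hg
  rcases _hg with h | h | h | h | h <;> omega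

def check (n : Int) : Bool :=
  let qhoa := PySem.Int.toStr n
  let _qhoa1 := PySem.Str.slice qhoa none none           -- qhoa[:]
  let _qhoa2 := PySem.Str.slice? qhoa none none (-1)     -- qhoa[::-1]
  match checkLoop n 0 with
  | none => false
  | some cnt =>
      decide (PySem.Int.mod cnt 2 = 1) &&
      -- 'qhoa[::1] == qhoa[::-1]': both slices always succeed, compared as Options
      decide (PySem.Str.slice? qhoa none none 1 = PySem.Str.slice? qhoa none none (-1))

-- ===== PORT B =====
def check_alt (n : Int) : Bool :=
  let s := PySem.Int.toStr n
  decide (0 < n) &&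
  decide (PySem.Int.mod (PySem.Str.len s) 2 = 1) &&
  -- 's == s[::-1]': the slice always succeeds, compared as Options
  decide (some s = PySem.Str.slice? s none none (-1)) &&
  -- "c in '02468'" for a single character c is membership among these five characters
  s.toList.all (fun c => (['0', '2', '4', '6', '8'] : List Char).contains c)

-- ===== PRECONDITION & SPEC =====
def Spec_check (n : Int) (out : Bool) : Prop := out = check_alt n
instance (n : Int) (out : Bool) : Decidable (Spec_check n out) := by unfold Spec_check; infer_instance

-- ===== CLAIM (what is proved, stated in full; the proofs are below) =====
def Claim_equal_check : Prop := ∀ (n : Int), Dom_check n → Spec_check n (check n)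

-- ===== LEMMAS AND PROOFS =====

-- indexing every position of a list in order rebuilds the list
lemma pv_filterMap_getElem_range {α : Type} (xs : List α) :
    List.filterMap (fun i => xs[i]?) (List.range xs.length) = xs := by
  induction xs using List.reverseRecOn with
  | nil => simp
  | append_singleton ys y ih =>
    rw [List.length_append, List.length_singleton, List.range_succ, List.filterMap_append]
    have hc : ∀ i ∈ List.range ys.length, (ys ++ [y])[i]? = ys[i]? := by
      intro i hi
      rw [List.mem_range] at hi
      rw [List.getElem?_append_left hi]
    rw [List.filterMap_congr hc, ih]
    simp

-- xs[::1] is the identity slice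
lemma pv_slice_one {α : Type} (xs : List α) : PySem.List.slice? xs none none 1 = some xs := by
  simp only [PySem.List.slice?, PySem.List.sliceIndices]
  norm_num
  by_cases h : 0 < xs.length
  · rw [if_pos h]
    exact pv_filterMap_getElem_range xs
  · rw [if_neg h]
    have hx : xs = [] := List.length_eq_zero_iff.mp (by omega)
    simp [hx]

lemma pv_str_slice_one (s : String) : PySem.Str.slice? s none none 1 = some s := by
  simp [PySem.Str.slice?, PySem.Chars.slice?, pv_slice_one]

-- Nat.toDigitsCore only prepends to its accumulator
lemma pv_tdc_shift (b : Nat) : ∀ (f n : Nat) (l : List Char),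
    Nat.toDigitsCore b f n l = Nat.toDigitsCore b f n [] ++ l := by
  intro f
  induction f with
  | zero => intro n l; simp [Nat.toDigitsCore]
  | succ f ih =>
    intro n l
    simp only [Nat.toDigitsCore]
    by_cases h : n / b = 0
    · simp [h]
    · simp only [h, if_false]
      rw [ih (n / b) ((n % b).digitChar :: l), ih (n / b) [(n % b).digitChar]]
      simp

-- str(m) for m > 0 is the base-10 digit list of m, most significant digit first
lemma pv_toDigits_eq : ∀ (f m : Nat), m < f → 0 < m →
    Nat.toDigitsCore 10 f m [] = ((Nat.digits 10 m).map Nat.digitChar).reverse := by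
  intro f
  induction f with
  | zero => intro m h; omega
  | succ f ih =>
    intro m hmf hm
    rw [Nat.digits_def' (by norm_num : (1 : Nat) < 10) hm]
    simp only [Nat.toDigitsCore, List.map_cons, List.reverse_cons]
    by_cases h : m / 10 = 0
    · rw [if_pos h, h]
      simp
    · rw [if_neg h]
      have hlt : m / 10 < m := Nat.div_lt_self hm (by norm_num)
      rw [pv_tdc_shift 10 f (m / 10) [(m % 10).digitChar],
        ih (m / 10) (by omega) (Nat.pos_of_ne_zero h)]

lemma pv_toDigits_eq' (m : Nat) (hm : 0 < m) :
    Nat.toDigits 10 m = ((Nat.digits 10 m).map Nat.digitChar).reverse :=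
  pv_toDigits_eq (m + 1) m (by omega) hm

lemma pv_loop_zero (cnt : Int) : checkLoop 0 cnt = some cnt := by
  rw [checkLoop]; simp

-- A's loop on a positive argument: succeeds iff every digit is even, counting the digits
lemma pv_loop_pos : ∀ (m : Nat), 0 < m → ∀ (cnt : Int), checkLoop (m : Int) cnt =
    if (Nat.digits 10 m).all (fun d => d % 2 == 0) then
      some (cnt + ((Nat.digits 10 m).length : Int)) else none := by
  intro m
  induction m using Nat.strong_induction_on with
  | _ m ih =>
    intro hm cnt
    rw [checkLoop]
    have hm0 : ¬ ((m : Int) = 0) := by omega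
    rw [dif_neg hm0]
    have hmod : PySem.Int.mod (m : Int) 10 = ((m % 10 : Nat) : Int) :=
      PySem.Int.mod_natCast m 10
    have hdiv : PySem.Int.floordiv (m : Int) 10 = ((m / 10 : Nat) : Int) :=
      PySem.Int.floordiv_natCast m 10
    have h10 : m % 10 < 10 := Nat.mod_lt _ (by norm_num)
    rw [Nat.digits_def' (by norm_num : (1 : Nat) < 10) hm]
    simp only [hmod, hdiv, List.all_cons, List.length_cons]
    by_cases hr : m % 10 % 2 = 0
    · have hC : ¬ (((m % 10 : Nat) : Int) ≠ 0 ∧ ((m % 10 : Nat) : Int) ≠ 2 ∧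
          ((m % 10 : Nat) : Int) ≠ 4 ∧ ((m % 10 : Nat) : Int) ≠ 6 ∧
          ((m % 10 : Nat) : Int) ≠ 8) := by
        rintro ⟨h0, h2, h4, h6, h8⟩
        omega
      rw [dif_neg hC]
      have hrb : (m % 10 % 2 == 0) = true := by simp [hr]
      by_cases hq : m / 10 = 0
      · rw [hq, Nat.cast_zero, pv_loop_zero, if_pos (by simp; omega)]
        simp
      · rw [ih (m / 10) (Nat.div_lt_self hm (by norm_num)) (Nat.pos_of_ne_zero hq) (cnt + 1)]
        by_cases ha : (Nat.digits 10 (m / 10)).all (fun d => d % 2 == 0)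
        · rw [if_pos ha, if_pos (by simp [ha]; omega)]
          congr 1
          push_cast
          ring
        · rw [if_neg (by simp [ha]), if_neg (by simp [ha])]
    · have hC : ((m % 10 : Nat) : Int) ≠ 0 ∧ ((m % 10 : Nat) : Int) ≠ 2 ∧
          ((m % 10 : Nat) : Int) ≠ 4 ∧ ((m % 10 : Nat) : Int) ≠ 6 ∧
          ((m % 10 : Nat) : Int) ≠ 8 := by
        refine ⟨?_, ?_, ?_, ?_, ?_⟩ <;> omega
      rw [dif_pos hC]
      rw [if_neg (by intro hco; simp at hco; omega)]

-- A's loop on a negative argument always ends in the early 'return False'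
lemma pv_loop_neg : ∀ (k : Nat) (n : Int), n.natAbs ≤ k → n < 0 → ∀ (cnt : Int),
    checkLoop n cnt = none := by
  intro k
  induction k with
  | zero => intro n hk hneg; omega
  | succ k ih =>
    intro n hk hneg cnt
    rw [checkLoop, dif_neg (by omega : ¬ (n = 0))]
    have h1 := PySem.Int.floordiv_mul_add_mod n 10
    have h2 := PySem.Int.mod_nonneg n (b := 10) (by omega)
    have h3 := PySem.Int.mod_lt n (b := 10) (by omega)
    by_cases hC : PySem.Int.mod n 10 ≠ 0 ∧ PySem.Int.mod n 10 ≠ 2 ∧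
        PySem.Int.mod n 10 ≠ 4 ∧ PySem.Int.mod n 10 ≠ 6 ∧ PySem.Int.mod n 10 ≠ 8
    · rw [dif_pos hC]
    · rw [dif_neg hC]
      simp only [not_and_or, not_not] at hC
      refine ih (PySem.Int.floordiv n 10) ?_ (by omega) (cnt + 1)
      rcases hC with h | h | h | h | h <;> omega

-- a digit below 10 renders as one of '0','2','4','6','8' iff it is even
lemma pv_digitChar_even (d : Nat) (hd : d < 10) :
    ((['0', '2', '4', '6', '8'] : List Char).contains d.digitChar) = (d % 2 == 0) := by
  interval_cases d <;> decide

-- ===== VERDICT (by name: the statement is the Claim_ definition above) =====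
theorem check_spec : Claim_equal_check := by
  intro n _
  unfold Spec_check
  rcases lt_trichotomy n 0 with hn | hn | hn
  · -- n < 0 : the loop fails, and B's positivity test fails
    have hA : checkLoop n 0 = none := pv_loop_neg n.natAbs n le_rfl hn 0
    unfold check check_alt
    simp only [hA]
    have hB : decide (0 < n) = false := by simp; omega
    simp [hB]
  · -- n = 0 : the loop counts zero digits (even), and B's positivity test fails
    subst hn
    unfold check check_alt
    simp only [pv_loop_zero]
    decide
  · -- n > 0
    obtain ⟨m, rfl⟩ : ∃ m : Nat, n = (m : Int) := ⟨n.toNat, (Int.toNat_of_nonneg hn.le).symm⟩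
    have hm : 0 < m := by exact_mod_cast hn
    unfold check check_alt
    simp only [pv_loop_pos m hm 0]
    have hs : (PySem.Int.toStr (m : Int)).toList = ((Nat.digits 10 m).map Nat.digitChar).reverse := by
      rw [PySem.Int.toList_toStr]
      simp only [PySem.Int.toChars]
      rw [if_neg (by omega : ¬ ((m : Int) < 0)), Int.toNat_natCast, pv_toDigits_eq' m hm]
    have hlen : PySem.Str.len (PySem.Int.toStr (m : Int)) = ((Nat.digits 10 m).length : Int) := by
      rw [PySem.Str.len_eq, hs]
      simp
    have hpos : decide (0 < (m : Int)) = true := by simp; omega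
    by_cases ha : (Nat.digits 10 m).all (fun d => d % 2 == 0)
    · rw [if_pos ha]
      have hall : (PySem.Int.toStr (m : Int)).toList.all
          (fun c => (['0', '2', '4', '6', '8'] : List Char).contains c) = true := by
        rw [hs, List.all_eq_true]
        intro c hc
        rw [List.mem_reverse, List.mem_map] at hc
        obtain ⟨d, hd, rfl⟩ := hc
        rw [pv_digitChar_even d (Nat.digits_lt_base (by norm_num) hd)]
        rw [List.all_eq_true] at ha
        exact ha d hd
      rw [pv_str_slice_one, PySem.Str.slice?_none_none_neg_one, hlen, hall, hpos]
      simp [zero_add]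
    · rw [if_neg ha]
      have hall : (PySem.Int.toStr (m : Int)).toList.all
          (fun c => (['0', '2', '4', '6', '8'] : List Char).contains c) = false := by
        rw [hs, List.all_eq_false]
        rw [List.all_eq_true] at ha
        push Not at ha
        obtain ⟨d, hd, hdo⟩ := ha
        refine ⟨d.digitChar, ?_, ?_⟩
        · rw [List.mem_reverse]
          exact List.mem_map_of_mem hd
        · rw [pv_digitChar_even d (Nat.digits_lt_base (by norm_num) hd)]
          simpa using hdo
      rw [hall]
      simp
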